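-- pv_equiv track=rewrite | github.com/leehwarang/Algorithm | hackerrank/priyanka-and-toys.py | toys
-- ===== SOURCE A (Python) =====
-- def toys(w):
--     container = 1
--     w.sort()
--     unit = w[0] + 4
--     w = w[1:]
--
--     for i in range(len(w)):
--         if w[i] > unit:
--             container += 1
--             unit = w[i] + 4
--
--     return container
-- ===== SOURCE B (Python) =====
-- def _bisect_right(a, x):
--     # hand-written bisect_right (plain binary search; no imports)
--     lo, hi = 0, len(a)
--     while lo < hi:
--         mid = (lo + hi) // 2
--         if x < a[mid]:
--             hi = mid
--         else:
--             lo = mid + 1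
--     return lo
--
--
-- def toys(w):
--     w.sort()
--     count = 1
--     thresh = w[0] + 4
--     i = _bisect_right(w, thresh)
--     while i < len(w):
--         count += 1
--         thresh = w[i] + 4
--         i = _bisect_right(w, thresh)
--     return count
-- ===== Notes on version B (the rewrite author's own statement) =====
-- stated objective: alternative
-- what changed: After sorting, B counts containers by repeated binary search (bisect_right jumps to the first toy that exceeds the current threshold) instead of A's element-by-element linear scan.
import Mathlib
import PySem

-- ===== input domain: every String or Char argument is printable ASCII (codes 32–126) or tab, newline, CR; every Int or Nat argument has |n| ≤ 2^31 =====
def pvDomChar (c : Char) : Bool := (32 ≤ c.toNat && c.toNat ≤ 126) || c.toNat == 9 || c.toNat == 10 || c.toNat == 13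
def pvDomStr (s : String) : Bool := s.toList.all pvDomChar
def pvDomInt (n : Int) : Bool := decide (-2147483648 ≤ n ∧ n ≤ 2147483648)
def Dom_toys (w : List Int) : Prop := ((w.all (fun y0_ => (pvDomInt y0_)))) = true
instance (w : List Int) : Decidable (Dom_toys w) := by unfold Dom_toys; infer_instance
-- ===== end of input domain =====

-- B counts the sorted toys by repeated binary search instead of A's linear scan; same return value.
-- Both A and B sort the argument list in place (same observable mutation); the theorems are about the return value.

-- ===== PORT A =====
def toys (w : List Int) : Int :=
  -- container = 1; w.sort(); unit = first element + 4; w = rest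
  let s := PySem.List.sorted w (fun x => x) false
  let unit : Int := PySem.List.pyGetD s 0 0 + 4
  let rest := PySem.List.slice s (some 1) none
  -- for i in range(len(w)): if w[i] > unit: container += 1; unit = w[i] + 4
  let st := (PySem.List.pyRange 0 (PySem.List.len rest)).foldl
    (fun (st : Int × Int) j =>
      let x := PySem.List.pyGetD rest j 0
      if x > st.2 then (st.1 + 1, x + 4) else st)
    ((1 : Int), unit)
  st.1

-- ===== PORT B =====
-- while i < len(w): count += 1; thresh = w[i] + 4; i = _bisect_right(w, thresh)
-- _bisect_right is the standard lo/hi halving loop, ported as PySem.List.bisectRight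
-- (literally the same loop); the fuel only makes the while-loop total, it is never
-- exhausted on a sorted list.
def toysAltLoop (s : List Int) : Nat → Nat → Int → Int
  | 0, _, count => count
  | fuel + 1, i, count =>
    if h : i < s.length then
      toysAltLoop s fuel (PySem.List.bisectRight s (s[i] + 4)) (count + 1)
    else count

def toys_alt (w : List Int) : Int :=
  let s := PySem.List.sorted w (fun x => x) false
  -- count = 1; thresh = first element + 4; i = _bisect_right(w, thresh)
  let thresh : Int := PySem.List.pyGetD s 0 0 + 4
  toysAltLoop s (s.length + 1) (PySem.List.bisectRight s thresh) 1

-- ===== PRECONDITION & SPEC =====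
-- Pre_ excludes only the empty list, on which A (and B) raise IndexError reading the first element.
def Pre_toys (w : List Int) : Prop := w ≠ []
instance (w : List Int) : Decidable (Pre_toys w) := by unfold Pre_toys; infer_instance
def pvWitness_toys : List Int := [1, 2, 3, 21, 7, 12, 14, 21]

def Spec_toys (w : List Int) (out : Int) : Prop := out = toys_alt w
instance (w : List Int) (out : Int) : Decidable (Spec_toys w out) := by unfold Spec_toys; infer_instance

-- ===== CLAIM (what is proved, stated in full; the proofs are below) =====
def Claim_equal_toys : Prop := ∀ (w : List Int), Dom_toys w → Pre_toys w → Spec_toys w (toys w)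

-- ===== LEMMAS AND PROOFS =====

-- Step function of A's scan.
def toysStep (st : Int × Int) (x : Int) : Int × Int :=
  if x > st.2 then (st.1 + 1, x + 4) else st

-- Elements ≤ u leave the state (c, u) unchanged.
lemma toysStep_skip (pre rest : List Int) (c u : Int)
    (h : ∀ x ∈ pre, x ≤ u) :
    (pre ++ rest).foldl toysStep (c, u) = rest.foldl toysStep (c, u) := by
  induction pre with
  | nil => rfl
  | cons x xs ih =>
      have hx : x ≤ u := h x (by simp)
      simp only [List.cons_append, List.foldl_cons, toysStep]
      rw [if_neg (by simp; omega)]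
      exact ih (fun y hy => h y (by simp [hy]))

-- Main invariant: on a sorted list, A's linear scan from index i equals B's jump loop,
-- provided everything before i is ≤ u and the fuel covers the remaining length.
lemma scan_eq_jump (s : List Int) (hs : s.Pairwise (· ≤ ·)) :
    ∀ (fuel i : Nat) (c u : Int), i ≤ s.length → s.length - i < fuel →
      (∀ j : Nat, (hj : j < s.length) → j < i → s[j] ≤ u) →
      ((s.drop i).foldl toysStep (c, u)).1 =
        toysAltLoop s fuel (PySem.List.bisectRight s u) c := by
  intro fuel
  induction fuel with
  | zero => intro i c u hi hf; omega
  | succ fuel ih =>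
      intro i c u hi hf hpre
      obtain ⟨hble, hlt, hgt⟩ := PySem.List.bisectRight_spec s u hs
      set b := PySem.List.bisectRight s u with hb
      have hib : i ≤ b := by
        by_contra hcon
        have hblen : b < s.length := by omega
        have := hgt b hblen (le_refl _)
        have := hpre b hblen (by omega)
        omega
      -- skip the elements s[i..b), all ≤ u
      have hdecomp : s.drop i = (s.drop i).take (b - i) ++ s.drop b := by
        have : (s.drop i).drop (b - i) = s.drop b := by
          rw [List.drop_drop]; congr 1; omega
        rw [← this, List.take_append_drop]
      have hskip : ∀ x ∈ (s.drop i).take (b - i), x ≤ u := by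
        intro x hx
        obtain ⟨k, hk, hxe⟩ := List.mem_take_iff_getElem.mp hx
        have hk' : k < b - i := lt_of_lt_of_le hk (min_le_left _ _)
        have hkd : k < (s.drop i).length := lt_of_lt_of_le hk (min_le_right _ _)
        have hkl : i + k < s.length := by
          rw [List.length_drop] at hkd; omega
        have : (s.drop i)[k]'(by simp [List.length_drop]; omega) = s[i + k] := by
          simp [List.getElem_drop]
        rw [← hxe, this]
        exact hlt (i + k) hkl (by omega)
      rw [hdecomp, toysStep_skip _ _ _ _ hskip]
      by_cases hbl : b < s.length
      · -- s[b] > u : A starts a new container; B jumps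
        have hdb : s.drop b = s[b] :: s.drop (b + 1) := List.drop_eq_getElem_cons hbl
        have hsb : u < s[b] := hgt b hbl (le_refl _)
        rw [hdb]
        simp only [List.foldl_cons, toysStep]
        rw [if_pos (by simpa using hsb)]
        rw [toysAltLoop]
        rw [dif_pos hbl]
        exact ih (b + 1) (c + 1) (s[b] + 4) (by omega) (by omega)
          (fun j hj hjb => by
            have hjs : s[j] ≤ s[b] := by
              rcases Nat.lt_or_ge j b with h' | h'
              · exact List.pairwise_iff_getElem.mp hs j b hj hbl h'
              · have : j = b := by omega
                simp [this]
            omega)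
      · -- b = len : nothing left, loop exits
        have hbl' : b = s.length := by omega
        rw [hbl', List.drop_length]
        rw [toysAltLoop]
        rw [dif_neg (by omega)]
        rfl

-- ===== VERDICT (by name: the statement is the Claim_ definition above) =====
theorem toys_spec : Claim_equal_toys := by
  intro w _ hw
  unfold Spec_toys toys toys_alt
  set s := PySem.List.sorted w (fun x => x) false with hsdef
  have hsne : s ≠ [] := by
    rw [hsdef, Ne, PySem.List.sorted_eq_nil_iff]; exact hw
  have hlen : 0 < s.length := List.length_pos_iff.mpr hsne
  have hs : s.Pairwise (· ≤ ·) := by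
    simpa using PySem.List.sorted_pairwise w (fun x => x)
  have hget : PySem.List.pyGetD s 0 0 = s[0] := by
    rw [PySem.List.pyGetD_zero, List.getD_eq_getElem?_getD, List.getElem?_eq_getElem hlen]
    rfl
  simp only [PySem.List.slice_from_one, hget]
  rw [show s.tail = s.drop 1 from List.drop_one.symm]
  rw [show (fun (st : Int × Int) j => if PySem.List.pyGetD (List.drop 1 s) j 0 > st.2 then (st.1 + 1, PySem.List.pyGetD (List.drop 1 s) j 0 + 4) else st) = (fun acc j => toysStep acc (PySem.List.pyGetD (List.drop 1 s) j 0)) from rfl]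
  rw [PySem.List.foldl_pyRange_pyGetD (s.drop 1) 0 toysStep ((1 : Int), s[0] + 4) (by norm_num)]
  rw [Int.toNat_zero, List.drop_zero]
  exact scan_eq_jump s hs (s.length + 1) 1 1 (s[0] + 4) hlen (by omega)
    (fun j hj hj1 => by
      have : j = 0 := by omega
      subst this; omega)
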